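-- pv_equiv track=rewrite | github.com/Hansd3rkann5/Pruefstand_Django | pruefstand/consumers copy.py | reflectByte
-- ===== SOURCE A (Python) =====
-- def reflectByte(inbyte):
--     """
--     Reflects a byte
--     :param inbyte: input byte
--     :return: reflected input byte
--     """
--     outbyte = 0
--     i = 0x01
--     j = 0x80
--
--     while j != 0:
--         if inbyte & i:
--             outbyte |= j
--         i <<= 1
--         j>>=1
--     return outbyte
-- ===== SOURCE B (Python) =====
-- def reflectByte(inbyte):
--     """
--     Reflects a byte
--     :param inbyte: input byte
--     :return: reflected input byte
--     """
--     m = inbyte & 0xFF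
--     m = ((m & 0xAA) >> 1) | ((m & 0x55) << 1)
--     m = ((m & 0xCC) >> 2) | ((m & 0x33) << 2)
--     m = ((m & 0xF0) >> 4) | ((m & 0x0F) << 4)
--     return m
-- ===== Notes on version B (the rewrite author's own statement) =====
-- stated objective: alternative
-- what changed: Replaced A's sequential per-bit mask-and-test loop with the classic divide-and-conquer bit reversal: mask the low byte once, then swap adjacent bits, bit pairs and nibbles with three fixed masked shift-and-OR steps.
import Mathlib
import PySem

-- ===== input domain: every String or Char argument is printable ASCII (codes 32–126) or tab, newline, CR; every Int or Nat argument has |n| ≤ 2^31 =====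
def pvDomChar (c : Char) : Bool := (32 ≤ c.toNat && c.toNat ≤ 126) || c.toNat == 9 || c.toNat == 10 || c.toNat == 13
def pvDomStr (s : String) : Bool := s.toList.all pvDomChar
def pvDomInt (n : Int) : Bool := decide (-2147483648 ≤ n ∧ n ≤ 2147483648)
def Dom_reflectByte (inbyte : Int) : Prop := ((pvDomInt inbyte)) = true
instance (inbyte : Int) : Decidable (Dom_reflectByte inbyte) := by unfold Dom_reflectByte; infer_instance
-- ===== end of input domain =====

set_option maxRecDepth 8000

-- B replaces A's sequential per-bit loop by the classic three masked swap steps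
-- (adjacent bits, bit pairs, nibbles) on the low byte; objective: alternative algorithm.

-- ===== PORT A =====
-- the while loop, fuel-guarded (fuel 9 covers the 8 iterations plus the final j = 0 test)
def reflectByteLoop : Nat → Int → Int → Int → Int → Int
  | 0, _, outbyte, _, _ => outbyte
  | fuel + 1, inbyte, outbyte, i, j =>
    if j ≠ 0 then
      reflectByteLoop fuel inbyte
        (if PySem.Int.band inbyte i ≠ 0 then PySem.Int.bor outbyte j else outbyte)
        (i <<< (1 : Nat)) (j >>> (1 : Nat))
    else outbyte

def reflectByte (inbyte : Int) : Int := reflectByteLoop 9 inbyte 0 1 128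

-- ===== PORT B =====
def reflectByte_alt (inbyte : Int) : Int :=
  let m0 := PySem.Int.band inbyte 255
  let m1 := PySem.Int.bor ((PySem.Int.band m0 170) >>> (1 : Nat)) ((PySem.Int.band m0 85) <<< (1 : Nat))
  let m2 := PySem.Int.bor ((PySem.Int.band m1 204) >>> (2 : Nat)) ((PySem.Int.band m1 51) <<< (2 : Nat))
  PySem.Int.bor ((PySem.Int.band m2 240) >>> (4 : Nat)) ((PySem.Int.band m2 15) <<< (4 : Nat))

-- ===== PRECONDITION & SPEC =====
def Spec_reflectByte (inbyte : Int) (out : Int) : Prop := out = reflectByte_alt inbyte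
instance (inbyte : Int) (out : Int) : Decidable (Spec_reflectByte inbyte out) := by unfold Spec_reflectByte; infer_instance

-- ===== CLAIM (what is proved, stated in full; the proofs are below) =====
def Claim_equal_reflectByte : Prop := ∀ (inbyte : Int), Dom_reflectByte inbyte → Spec_reflectByte inbyte (reflectByte inbyte)

-- ===== LEMMAS AND PROOFS =====

-- a mask below 256 only sees the argument's low byte
theorem natkey (m n : Nat) (hm : m < 256) : m &&& n = m &&& (n % 256) := by
  have h8 := Nat.and_two_pow_sub_one_eq_mod m 8
  have h8' := Nat.and_two_pow_sub_one_eq_mod n 8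
  norm_num at h8 h8'
  have h255 : m &&& 255 = m := by omega
  calc m &&& n = (m &&& 255) &&& n := by rw [h255]
    _ = m &&& (255 &&& n) := Nat.and_assoc m 255 n
    _ = m &&& (n &&& 255) := by rw [Nat.and_comm 255 n]
    _ = m &&& (n % 256) := by rw [h8']

-- PySem.Int.band with a mask below 256 only depends on the argument mod 256
theorem bandmask (b : Int) (c : Nat) (hc : c < 256)
    (hkey : ∀ t : Nat, t < 256 → c - (c &&& t) = (255 - t) &&& c) :
    PySem.Int.band b (c : Int) = PySem.Int.band (b % 256) (c : Int) := by
  have hr0 : 0 ≤ b % 256 := Int.emod_nonneg b (by norm_num)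
  have hr1 : b % 256 < 256 := Int.emod_lt_of_pos b (by norm_num)
  have hc0 : (0 : Int) ≤ (c : Int) := Int.natCast_nonneg c
  rw [PySem.Int.band.eq_1, PySem.Int.band.eq_1]
  by_cases hb : 0 ≤ b
  · rw [if_pos hb, if_pos hc0, if_pos hr0, if_pos hc0]
    have h1 : (b % 256).toNat = b.toNat % 256 := by omega
    have h2 : ((c : Int)).toNat = c := Int.toNat_natCast c
    rw [h1, h2]
    rw [Nat.and_comm b.toNat c, Nat.and_comm (b.toNat % 256) c, natkey c b.toNat hc]
  · rw [if_neg hb, if_pos hc0, if_pos hr0, if_pos hc0]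
    have h2 : ((c : Int)).toNat = c := Int.toNat_natCast c
    rw [h2]
    set u := (-b - 1).toNat with hu
    have hru : (b % 256).toNat = 255 - u % 256 := by omega
    rw [hru, natkey c u hc, hkey (u % 256) (Nat.mod_lt u (by norm_num))]

theorem bm1 (b : Int) : PySem.Int.band b 1 = PySem.Int.band (b % 256) 1 := by
  have := bandmask b 1 (by norm_num) (by decide)
  exact_mod_cast this

theorem bm2 (b : Int) : PySem.Int.band b 2 = PySem.Int.band (b % 256) 2 := by
  have := bandmask b 2 (by norm_num) (by decide)
  exact_mod_cast this

theorem bm4 (b : Int) : PySem.Int.band b 4 = PySem.Int.band (b % 256) 4 := by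
  have := bandmask b 4 (by norm_num) (by decide)
  exact_mod_cast this

theorem bm8 (b : Int) : PySem.Int.band b 8 = PySem.Int.band (b % 256) 8 := by
  have := bandmask b 8 (by norm_num) (by decide)
  exact_mod_cast this

theorem bm16 (b : Int) : PySem.Int.band b 16 = PySem.Int.band (b % 256) 16 := by
  have := bandmask b 16 (by norm_num) (by decide)
  exact_mod_cast this

theorem bm32 (b : Int) : PySem.Int.band b 32 = PySem.Int.band (b % 256) 32 := by
  have := bandmask b 32 (by norm_num) (by decide)
  exact_mod_cast this

theorem bm64 (b : Int) : PySem.Int.band b 64 = PySem.Int.band (b % 256) 64 := by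
  have := bandmask b 64 (by norm_num) (by decide)
  exact_mod_cast this

theorem bm128 (b : Int) : PySem.Int.band b 128 = PySem.Int.band (b % 256) 128 := by
  have := bandmask b 128 (by norm_num) (by decide)
  exact_mod_cast this

theorem bm255 (b : Int) : PySem.Int.band b 255 = PySem.Int.band (b % 256) 255 := by
  have := bandmask b 255 (by norm_num) (by decide)
  exact_mod_cast this

-- A's loop only depends on inbyte mod 256 (loop invariant: i = 2^k, j = 128 >> k)
theorem loopkey : ∀ (fuel : Nat) (b out i j : Int) (k : Nat), k ≤ 8 → i = 2 ^ k → j = (128 : Int) >>> k →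
    reflectByteLoop fuel b out i j = reflectByteLoop fuel (b % 256) out i j := by
  intro fuel
  induction fuel with
  | zero => intro b out i j k hk hi hj; rfl
  | succ f ih =>
    intro b out i j k hk hi hj
    subst hi hj
    interval_cases k
    · simp only [reflectByteLoop]
      norm_num [Int.shiftRight_eq_div_pow, Int.shiftLeft_eq_mul_pow]
      rw [bm1 b]
      exact ih b _ _ _ 1 (by norm_num) (by decide) (by decide)
    · simp only [reflectByteLoop]
      norm_num [Int.shiftRight_eq_div_pow, Int.shiftLeft_eq_mul_pow]
      rw [bm2 b]
      exact ih b _ _ _ 2 (by norm_num) (by decide) (by decide)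
    · simp only [reflectByteLoop]
      norm_num [Int.shiftRight_eq_div_pow, Int.shiftLeft_eq_mul_pow]
      rw [bm4 b]
      exact ih b _ _ _ 3 (by norm_num) (by decide) (by decide)
    · simp only [reflectByteLoop]
      norm_num [Int.shiftRight_eq_div_pow, Int.shiftLeft_eq_mul_pow]
      rw [bm8 b]
      exact ih b _ _ _ 4 (by norm_num) (by decide) (by decide)
    · simp only [reflectByteLoop]
      norm_num [Int.shiftRight_eq_div_pow, Int.shiftLeft_eq_mul_pow]
      rw [bm16 b]
      exact ih b _ _ _ 5 (by norm_num) (by decide) (by decide)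
    · simp only [reflectByteLoop]
      norm_num [Int.shiftRight_eq_div_pow, Int.shiftLeft_eq_mul_pow]
      rw [bm32 b]
      exact ih b _ _ _ 6 (by norm_num) (by decide) (by decide)
    · simp only [reflectByteLoop]
      norm_num [Int.shiftRight_eq_div_pow, Int.shiftLeft_eq_mul_pow]
      rw [bm64 b]
      exact ih b _ _ _ 7 (by norm_num) (by decide) (by decide)
    · simp only [reflectByteLoop]
      norm_num [Int.shiftRight_eq_div_pow, Int.shiftLeft_eq_mul_pow]
      rw [bm128 b]
      exact ih b _ _ _ 8 (by norm_num) (by decide) (by decide)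
    · simp only [reflectByteLoop]
      norm_num [Int.shiftRight_eq_div_pow]

-- spot check on the full byte range
theorem LC : ∀ n : Nat, n < 256 → reflectByte ((n : Nat) : Int) = reflectByte_alt ((n : Nat) : Int) := by decide

theorem LB (b : Int) : reflectByte_alt b = reflectByte_alt (b % 256) := by
  simp only [reflectByte_alt, bm255 b]

-- ===== VERDICT (by name: the statement is the Claim_ definition above) =====
theorem reflectByte_spec : Claim_equal_reflectByte := by
  intro b _
  unfold Spec_reflectByte
  have hA : reflectByte b = reflectByte (b % 256) :=
    loopkey 9 b 0 1 128 0 (by norm_num) (by decide) (by decide)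
  have hr0 : 0 ≤ b % 256 := Int.emod_nonneg b (by norm_num)
  have hr1 : b % 256 < 256 := Int.emod_lt_of_pos b (by norm_num)
  have hLC := LC (b % 256).toNat (by omega)
  rw [Int.toNat_of_nonneg hr0] at hLC
  rw [hA, hLC, ← LB b]
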